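-- pv_equiv track=rewrite | github.com/hlibbabii/log-recommender | log_recommender/preprocessors.py | merge_tabs
-- ===== SOURCE A (Python) =====
-- def merge_tabs(tokens):
--     res = []
--     count = 0
--     for word in tokens:
--         if word == '\t':
--             count += 1
--         else:
--             if count != 0:
--                 res.append('\t' + str(count))
--                 count = 0
--             res.append(word)
--     if count != 0:
--         res.append('\t' + str(count))
--     return res
-- ===== SOURCE B (Python) =====
-- def merge_tabs(tokens):
--     res = []
--     i = 0
--     n = len(tokens)
--     while i < n:
--         j = i
--         while j < n and tokens[j] == tokens[i]:
--             j += 1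
--         if tokens[i] == '\t':
--             res.append('\t' + str(j - i))
--         else:
--             res.extend(tokens[i:j])
--         i = j
--     return res
-- ===== Notes on version B (the rewrite author's own statement) =====
-- stated objective: alternative
-- what changed: B splits the input into maximal runs of equal consecutive tokens (groupby-style two-index scan) and emits a count marker per tab run, instead of A's running counter with a duplicated flush inside the loop and after it.
import Mathlib
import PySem

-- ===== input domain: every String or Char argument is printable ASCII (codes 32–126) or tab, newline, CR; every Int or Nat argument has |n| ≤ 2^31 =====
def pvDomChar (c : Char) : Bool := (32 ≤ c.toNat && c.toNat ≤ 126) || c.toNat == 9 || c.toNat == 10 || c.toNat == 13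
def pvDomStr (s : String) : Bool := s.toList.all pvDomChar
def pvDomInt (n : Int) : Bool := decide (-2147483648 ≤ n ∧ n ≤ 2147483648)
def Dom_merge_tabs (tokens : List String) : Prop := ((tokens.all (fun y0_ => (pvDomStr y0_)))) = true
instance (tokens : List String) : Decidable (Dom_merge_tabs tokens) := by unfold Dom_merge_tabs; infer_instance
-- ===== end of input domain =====

-- B replaces A's running tab counter (with its duplicated in-loop and trailing flush) by a
-- groupby-style scan over maximal runs of equal consecutive tokens; return values are equal.

-- ===== PORT A =====
-- A: one pass with accumulator (res, count); flush '\t'+str(count) before a non-tab and at the end.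
def merge_tabs (tokens : List String) : List String :=
  let p := tokens.foldl (fun (s : List String × Int) word =>
    if word = "\t" then (s.1, s.2 + 1)
    else ((if s.2 ≠ 0 then s.1 ++ ["\t" ++ PySem.Int.toStr s.2] else s.1) ++ [word], 0))
    ([], 0)
  if p.2 ≠ 0 then p.1 ++ ["\t" ++ PySem.Int.toStr p.2] else p.1

-- ===== PORT B =====
-- B: the inner while-loop scanning j past tokens equal to tokens[i] is the run
-- x :: xs.takeWhile (· == x); the outer loop 'i = j' is recursion on the dropWhile suffix.
def merge_tabs_alt (tokens : List String) : List String :=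
  match tokens with
  | [] => []
  | x :: xs =>
    let run := x :: xs.takeWhile (· == x)
    (if x = "\t" then ["\t" ++ PySem.Int.toStr (run.length : Int)] else run)
      ++ merge_tabs_alt (xs.dropWhile (· == x))
termination_by tokens.length
decreasing_by
  have := List.length_dropWhile_le (· == x) xs
  simp; omega

-- ===== PRECONDITION & SPEC =====
def Spec_merge_tabs (tokens : List String) (out : List String) : Prop := out = merge_tabs_alt tokens
instance (tokens : List String) (out : List String) : Decidable (Spec_merge_tabs tokens out) := by unfold Spec_merge_tabs; infer_instance

-- ===== CLAIM (what is proved, stated in full; the proofs are below) =====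
def Claim_equal_merge_tabs : Prop := ∀ (tokens : List String), Dom_merge_tabs tokens → Spec_merge_tabs tokens (merge_tabs tokens)

-- ===== LEMMAS AND PROOFS =====

-- reference recursion: A's pending-counter semantics, written structurally
def goA : List String → Int → List String
  | [], c => if c ≠ 0 then ["\t" ++ PySem.Int.toStr c] else []
  | w :: ws, c =>
    if w = "\t" then goA ws (c + 1)
    else (if c ≠ 0 then ["\t" ++ PySem.Int.toStr c] else []) ++ w :: goA ws 0

lemma foldl_goA (toks : List String) : ∀ (res : List String) (c : Int),
    (let p := toks.foldl (fun (s : List String × Int) word =>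
        if word = "\t" then (s.1, s.2 + 1)
        else ((if s.2 ≠ 0 then s.1 ++ ["\t" ++ PySem.Int.toStr s.2] else s.1) ++ [word], 0))
        (res, c)
     if p.2 ≠ 0 then p.1 ++ ["\t" ++ PySem.Int.toStr p.2] else p.1)
    = res ++ goA toks c := by
  induction toks with
  | nil => intro res c; simp [goA]; split_ifs <;> simp
  | cons w ws ih =>
    intro res c
    by_cases hw : w = "\t"
    · simp only [List.foldl_cons, hw, goA, ih]
      simp
    · simp only [List.foldl_cons, if_neg hw, goA, ih]
      split_ifs <;> simp

lemma merge_tabs_eq_goA (toks : List String) : merge_tabs toks = goA toks 0 := by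
  have h := foldl_goA toks [] 0
  simpa [merge_tabs] using h

-- pending counter c > 0: goA absorbs the leading tab run and emits one marker
lemma goA_count (xs : List String) : ∀ c : Int, 0 < c →
    goA xs c = ("\t" ++ PySem.Int.toStr (c + ((xs.takeWhile (· == "\t")).length : Int)))
      :: goA (xs.dropWhile (· == "\t")) 0 := by
  induction xs with
  | nil => intro c hc; simp [goA]; omega
  | cons x xs ih =>
    intro c hc
    by_cases hx : x = "\t"
    · subst hx
      simp only [goA, List.takeWhile_cons, List.dropWhile_cons]
      rw [ih (c + 1) (by omega)]
      simp
      ring_nf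
    · have hb : (x == "\t") = false := by simp [hx]
      have hc' : c ≠ 0 := by omega
      simp only [goA, if_neg hx, List.takeWhile_cons, List.dropWhile_cons, hb,
        Bool.false_eq_true, if_false, List.length_nil, Int.natCast_zero, add_zero, if_pos hc']
      simp

-- leading run of non-tab tokens passes through goA unchanged
lemma goA_run (t : List String) (d : List String) (h : ∀ y ∈ t, y ≠ "\t") :
    goA (t ++ d) 0 = t ++ goA d 0 := by
  induction t with
  | nil => simp
  | cons x xs ih =>
    have hx : x ≠ "\t" := h x (by simp)
    simp only [List.cons_append, goA, if_neg hx]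
    simp [ih (fun y hy => h y (by simp [hy]))]

lemma alt_eq_goA (toks : List String) : merge_tabs_alt toks = goA toks 0 := by
  induction toks using merge_tabs_alt.induct with
  | case1 => simp [merge_tabs_alt, goA]
  | case2 x xs ih =>
    rw [merge_tabs_alt]
    by_cases hx : x = "\t"
    · subst hx
      simp only [ih]
      have : goA ("\t" :: xs) 0 = goA xs 1 := by simp [goA]
      rw [this, goA_count xs 1 (by omega)]
      simp
      ring_nf
    · simp only [if_neg hx, ih]
      have ht : ∀ y ∈ x :: xs.takeWhile (· == x), y ≠ "\t" := by
        intro y hy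
        rcases List.mem_cons.mp hy with h | h
        · simp [h, hx]
        · have := List.mem_takeWhile_imp h
          simp at this; simp [this, hx]
      have hsplit : xs.takeWhile (· == x) ++ xs.dropWhile (· == x) = xs :=
        List.takeWhile_append_dropWhile
      calc (x :: xs.takeWhile (· == x)) ++ goA (xs.dropWhile (· == x)) 0
          = x :: goA (xs.takeWhile (· == x) ++ xs.dropWhile (· == x)) 0 := by
            rw [goA_run _ _ (fun y hy => ht y (by simp [hy]))]
            simp
        _ = goA (x :: xs) 0 := by rw [hsplit]; simp [goA, hx]

-- ===== VERDICT (by name: the statement is the Claim_ definition above) =====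
theorem merge_tabs_spec : Claim_equal_merge_tabs := by
  intro toks _
  unfold Spec_merge_tabs
  rw [merge_tabs_eq_goA, alt_eq_goA]
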